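-- pv_equiv track=rewrite | github.com/sergun4ik/projecteuler | problem_112.py | num_type
-- ===== SOURCE A (Python) =====
-- def num_type(num):
--     decreasing = True
--     increasing = True
--     bouncy = True
--     strnum = str(num)
--     for x in range(len(strnum)-1):
--         if strnum[x]>strnum[x+1]:
--             increasing = False
--         if strnum[x]<strnum[x+1]:
--             decreasing = False
--     if increasing:
--         return ("increasing")
--     if decreasing:
--         return ("decreasing")
--     else:
--         return ("bouncy")
-- ===== SOURCE B (Python) =====
-- def num_type(num):
--     s = str(num)
--     if s == ''.join(sorted(s)):
--         return "increasing"
--     if s == ''.join(sorted(s, reverse=True)):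
--         return "decreasing"
--     return "bouncy"
-- ===== Notes on version B (the rewrite author's own statement) =====
-- stated objective: idiomatic
-- what changed: Replaces the index loop maintaining two boolean flags by comparing the digit string against its sorted and reverse-sorted permutations (a string is monotone iff it equals its own sort), keeping the increasing-first precedence.
import Mathlib
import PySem

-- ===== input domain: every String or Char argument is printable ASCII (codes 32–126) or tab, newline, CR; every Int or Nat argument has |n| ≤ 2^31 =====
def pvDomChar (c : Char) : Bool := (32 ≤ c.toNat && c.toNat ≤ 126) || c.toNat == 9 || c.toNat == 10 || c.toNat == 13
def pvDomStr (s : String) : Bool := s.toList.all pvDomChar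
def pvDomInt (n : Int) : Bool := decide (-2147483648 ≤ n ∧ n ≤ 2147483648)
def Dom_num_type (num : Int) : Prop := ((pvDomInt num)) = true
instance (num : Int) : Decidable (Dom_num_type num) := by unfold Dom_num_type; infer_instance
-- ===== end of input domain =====

-- B classifies by comparing the digit string with its sorted / reverse-sorted permutation
-- instead of A's index loop with two flags; return values agree on all ints (idiomatic rewrite).

-- ===== PORT A =====
-- one iteration of A's loop body at index x (flags st = (increasing, decreasing))
def numTypeStepA (l : List Char) (st : Bool × Bool) (x : Int) : Bool × Bool :=
  match PySem.List.pyGet? l x, PySem.List.pyGet? l (x + 1) with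
  | some a, some b =>
      (if b < a then false else st.1, if a < b then false else st.2)
  | _, _ => st

def num_type (num : Int) : String :=
  let strnum := PySem.Int.toStr num
  let l := strnum.toList
  let st := (PySem.List.pyRange 0 ((l.length : Int) - 1) 1).foldl (numTypeStepA l) (true, true)
  if st.1 then "increasing"
  else if st.2 then "decreasing"
  else "bouncy"

-- ===== PORT B =====
def num_type_alt (num : Int) : String :=
  let s := PySem.Int.toStr num
  let cs := s.toList
  if PySem.List.sorted cs (fun c => c) false = cs then "increasing"
  else if PySem.List.sorted cs (fun c => c) true = cs then "decreasing"
  else "bouncy"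

-- ===== PRECONDITION & SPEC =====
def Spec_num_type (num : Int) (out : String) : Prop := out = num_type_alt num
instance (num : Int) (out : String) : Decidable (Spec_num_type num out) := by unfold Spec_num_type; infer_instance

-- ===== CLAIM (what is proved, stated in full; the proofs are below) =====
def Claim_equal_num_type : Prop := ∀ (num : Int), Dom_num_type num → Spec_num_type num (num_type num)

-- ===== LEMMAS AND PROOFS =====

theorem numType_chain_take_succ {l : List Char} {R : Char → Char → Prop} (m : ℕ)
    (h : m + 1 < l.length) :
    (l.take (m + 1 + 1)).IsChain R ↔ (l.take (m + 1)).IsChain R ∧ R l[m] l[m + 1] := by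
  have hm : m < l.length := by omega
  have h1 : l.take (m + 1 + 1) = l.take (m + 1) ++ [l[m + 1]] := by
    rw [List.take_succ]; simp [List.getElem?_eq_getElem h]
  have h2 : l.take (m + 1) = l.take m ++ [l[m]] := by
    rw [List.take_succ]; simp [List.getElem?_eq_getElem hm]
  rw [h1, List.isChain_append]
  constructor
  · rintro ⟨hc, -, hlast⟩
    refine ⟨hc, hlast _ ?_ _ rfl⟩
    rw [h2, List.getLast?_concat]
    rfl
  · rintro ⟨hc, hR⟩
    refine ⟨hc, by simp, ?_⟩
    intro x hx y hy
    rw [h2, List.getLast?_concat] at hx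
    simp at hx hy
    subst hx; subst hy; exact hR

theorem numType_take_one_chain (l : List Char) (R : Char → Char → Prop) :
    (l.take 1).IsChain R := by
  match l with
  | [] => simp
  | a :: t => simp

-- A's loop over indices 0..m-1 computes the two monotonicity flags of the prefix take (m+1)
theorem numType_loopA (l : List Char) (m : ℕ) (hm : m + 1 ≤ l.length) (i d : Bool) :
    (PySem.List.pyRange 0 (m : Int) 1).foldl (numTypeStepA l) (i, d)
      = (i && decide ((l.take (m + 1)).IsChain (· ≤ ·)),
         d && decide ((l.take (m + 1)).IsChain (fun a b => b ≤ a))) := by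
  induction m generalizing i d with
  | zero =>
      rw [PySem.List.pyRange_one_eq_nil (by norm_num)]
      simp [numType_take_one_chain]
  | succ m ih =>
      have hm' : m + 1 ≤ l.length := by omega
      have hlt : m + 1 < l.length := by omega
      have hmlt : m < l.length := by omega
      rw [show ((m + 1 : ℕ) : Int) = (m : Int) + 1 by push_cast; ring,
          PySem.List.pyRange_one_succ_right (by positivity), List.foldl_append,
          ih hm' i d]
      simp only [List.foldl_cons, List.foldl_nil]
      unfold numTypeStepA
      rw [show ((m : Int) + 1) = ((m + 1 : ℕ) : Int) by push_cast; ring]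
      simp only [PySem.List.pyGet?_natCast, List.getElem?_eq_getElem hmlt,
        List.getElem?_eq_getElem hlt]
      rcases lt_trichotomy l[m] l[m + 1] with h | h | h
      · simp [numType_chain_take_succ m hlt, not_lt_of_gt h, le_of_lt h, not_le.mpr h]
      · simp [numType_chain_take_succ m hlt, h]
      · simp [numType_chain_take_succ m hlt, not_lt_of_gt h, le_of_lt h, not_le.mpr h]

theorem numType_flagsA (l : List Char) :
    (PySem.List.pyRange 0 ((l.length : Int) - 1) 1).foldl (numTypeStepA l) (true, true)
      = (decide (l.IsChain (· ≤ ·)), decide (l.IsChain (fun a b => b ≤ a))) := by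
  match hl : l with
  | [] =>
      rw [show (([] : List Char).length : Int) - 1 = -1 by simp,
          PySem.List.pyRange_one_eq_nil (by norm_num)]
      simp
  | a :: t =>
      have hc : (((a :: t).length : ℕ) : Int) - 1 = ((t.length : ℕ) : Int) := by
        simp
      rw [hc, numType_loopA (a :: t) t.length (by simp)]
      simp [List.take_of_length_le]

theorem numType_sorted_eq_iff (cs : List Char) :
    PySem.List.sorted cs (fun c => c) false = cs ↔ cs.IsChain (· ≤ ·) := by
  constructor
  · intro h
    have hp := PySem.List.sorted_pairwise cs (fun c => c)
    rw [h] at hp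
    exact List.isChain_iff_pairwise.mpr (by simpa using hp)
  · intro h
    exact PySem.List.sorted_eq_self_of_pairwise cs (fun c => c)
      (by simpa using List.isChain_iff_pairwise.mp h)

theorem numType_sortedRev_eq_iff (cs : List Char) :
    PySem.List.sorted cs (fun c => c) true = cs ↔ cs.IsChain (fun a b => b ≤ a) := by
  have tr : Trans (fun a b : Char => b ≤ a) (fun a b : Char => b ≤ a) (fun a b : Char => b ≤ a) :=
    ⟨fun h1 h2 => le_trans h2 h1⟩
  constructor
  · intro h
    have hp := PySem.List.sorted_pairwise_rev cs (fun c => c)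
    rw [h] at hp
    exact (@List.isChain_iff_pairwise _ _ _ tr).mpr (by simpa using hp)
  · intro h
    exact PySem.List.sorted_rev_eq_self_of_pairwise cs (fun c => c)
      (by simpa using (@List.isChain_iff_pairwise _ _ _ tr).mp h)

-- ===== VERDICT (by name: the statement is the Claim_ definition above) =====
theorem num_type_spec : Claim_equal_num_type := by
  intro num _
  show num_type num = num_type_alt num
  unfold num_type num_type_alt
  simp only [numType_flagsA]
  by_cases hI : ((PySem.Int.toStr num).toList).IsChain (· ≤ ·) <;>
  by_cases hD : ((PySem.Int.toStr num).toList).IsChain (fun a b => b ≤ a) <;>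
    simp [numType_sorted_eq_iff, numType_sortedRev_eq_iff]
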